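-- pv_equiv track=rewrite | github.com/feuyeux/hello-skills | translate-tts/scripts/translate_tts.py | resolve_speaker
-- ===== SOURCE A (Python) =====
-- from typing import Dict, List, Optional, Tuple
--
-- def resolve_speaker(preferred: str, supported_speakers: List[str]) -> str:
--     if not supported_speakers:
--         return preferred
--
--     supported_set = {s.lower() for s in supported_speakers}
--     preferred_lower = preferred.lower()
--     if preferred_lower in supported_set:
--         return preferred_lower
--
--     return "serena" if "serena" in supported_set else sorted(supported_set)[0]
-- ===== SOURCE B (Python) =====
-- def resolve_speaker(preferred, supported_speakers):
--     if not supported_speakers: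
--         return preferred
--     preferred_lower = preferred.lower()
--     found_pref = False
--     found_serena = False
--     minimum = None
--     for s in supported_speakers:
--         low = s.lower()
--         if low == preferred_lower:
--             found_pref = True
--         if low == "serena":
--             found_serena = True
--         if minimum is None or low < minimum:
--             minimum = low
--     if found_pref:
--         return preferred_lower
--     if found_serena:
--         return "serena"
--     return minimum
-- ===== Notes on version B (the rewrite author's own statement) =====
-- stated objective: faster
-- what changed: Replaces the set comprehension plus membership tests plus sorted()[0] fallback with a single linear scan that maintains two membership flags and the running minimum lowercased name directly.
import Mathlib
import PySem

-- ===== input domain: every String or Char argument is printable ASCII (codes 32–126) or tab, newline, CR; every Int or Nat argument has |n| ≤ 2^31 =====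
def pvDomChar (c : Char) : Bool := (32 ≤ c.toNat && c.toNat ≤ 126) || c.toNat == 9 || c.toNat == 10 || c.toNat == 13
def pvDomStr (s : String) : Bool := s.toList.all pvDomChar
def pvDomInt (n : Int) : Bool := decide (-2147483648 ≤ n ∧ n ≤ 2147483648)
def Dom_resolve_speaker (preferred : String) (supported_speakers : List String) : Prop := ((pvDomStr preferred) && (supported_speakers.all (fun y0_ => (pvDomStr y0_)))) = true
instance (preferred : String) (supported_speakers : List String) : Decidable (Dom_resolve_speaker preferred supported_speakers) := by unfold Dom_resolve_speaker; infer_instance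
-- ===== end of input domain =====

-- B replaces the set-build + sorted()[0] fallback with one linear scan keeping two flags and the running minimum (alternative decomposition).


-- ===== PORT A =====
def resolve_speaker (preferred : String) (supported_speakers : List String) : String :=
  if supported_speakers = [] then preferred
  else
    let supported_set : PySem.Set String := PySem.Set.ofList (supported_speakers.map PySem.Str.lower)
    let preferred_lower := PySem.Str.lower preferred
    if PySem.Set.contains supported_set preferred_lower then preferred_lower
    else if PySem.Set.contains supported_set "serena" then "serena"
    else (PySem.List.sorted supported_set (fun x => x) false).headD ""
    -- sorted(supported_set)[0]: the set is nonempty here, so [0] never raises; headD is exact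

-- ===== PORT B =====
def pvStepB (pl : String) (st : Bool × Bool × Option String) (s : String) : Bool × Bool × Option String :=
  let low := PySem.Str.lower s
  (st.1 || (low == pl),
   st.2.1 || (low == "serena"),
   match st.2.2 with
   | none => some low
   | some v => if low < v then some low else some v)

def resolve_speaker_alt (preferred : String) (supported_speakers : List String) : String :=
  if supported_speakers = [] then preferred
  else
    let pl := PySem.Str.lower preferred
    let st := supported_speakers.foldl (pvStepB pl) (false, false, none)
    if st.1 then pl
    else if st.2.1 then "serena"
    else st.2.2.getD ""   -- minimum is never None here (list nonempty)

-- ===== PRECONDITION & SPEC =====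
def Spec_resolve_speaker (preferred : String) (supported_speakers : List String) (out : String) : Prop := out = resolve_speaker_alt preferred supported_speakers
instance (preferred : String) (supported_speakers : List String) (out : String) : Decidable (Spec_resolve_speaker preferred supported_speakers out) := by unfold Spec_resolve_speaker; infer_instance

-- ===== CLAIM (what is proved, stated in full; the proofs are below) =====
def Claim_equal_resolve_speaker : Prop := ∀ (preferred : String) (supported_speakers : List String), Dom_resolve_speaker preferred supported_speakers → Spec_resolve_speaker preferred supported_speakers (resolve_speaker preferred supported_speakers)

-- ===== LEMMAS AND PROOFS =====

-- running-minimum component of B's fold, isolated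
def pvMFold (m : Option String) (ys : List String) : Option String :=
  ys.foldl (fun acc y => match acc with
    | none => some y
    | some v => if y < v then some y else some v) m

theorem pvBeqComm (a b : String) : (a == b) = decide (b = a) := by
  by_cases h : a = b
  · subst h; simp
  · have h' : ¬ b = a := fun e => h e.symm
    simp [h, h']

theorem pvFold_char (pl : String) (xs : List String) (fp fs : Bool) (m : Option String) :
    xs.foldl (pvStepB pl) (fp, fs, m) =
      (fp || (xs.map PySem.Str.lower).contains pl,
       fs || (xs.map PySem.Str.lower).contains "serena",
       pvMFold m (xs.map PySem.Str.lower)) := by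
  induction xs generalizing fp fs m with
  | nil => simp [pvMFold]
  | cons x t ih =>
    simp only [List.foldl_cons, List.map_cons, pvStepB]
    rw [ih]
    simp [pvMFold, Bool.or_assoc, pvBeqComm]

theorem pvMFold_some (ys : List String) (v : String) :
    pvMFold (some v) ys = some (ys.foldl min v) := by
  induction ys generalizing v with
  | nil => simp [pvMFold]
  | cons y t ih =>
    simp only [pvMFold, List.foldl_cons] at *
    by_cases h : y < v
    · rw [if_pos h, ih, min_eq_right h.le]
    · rw [if_neg h, ih, min_eq_left (not_lt.mp h)]

theorem pvContains_ofList (ys : List String) (a : String) :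
    PySem.Set.contains (PySem.Set.ofList ys) a = ys.contains a := by
  simp [PySem.Set.contains, PySem.Set.mem_ofList]

-- (proof of the verdict)
theorem resolve_speaker_spec : Claim_equal_resolve_speaker := by
  intro preferred supported_speakers _
  unfold Spec_resolve_speaker resolve_speaker resolve_speaker_alt
  rcases supported_speakers with _ | ⟨x, t⟩
  · simp
  · simp only [if_neg (List.cons_ne_nil x t)]
    rw [pvFold_char]
    set pl := PySem.Str.lower preferred with hpl
    set ys : List String := (x :: t).map PySem.Str.lower with hys
    rw [pvContains_ofList, pvContains_ofList]
    simp only [Bool.false_or, List.contains_iff_mem]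
    by_cases h1 : pl ∈ ys
    · simp [h1]
    · simp only [h1, if_false]
      by_cases h2 : "serena" ∈ ys
      · simp [h2]
      · simp only [h2, if_false]
        -- fallback: sorted(set)[0] = running minimum
        have hmin : PySem.List.min? ys (fun y => y)
            = some ((t.map PySem.Str.lower).foldl min (PySem.Str.lower x)) := by
          show PySem.List.min? (PySem.Str.lower x :: t.map PySem.Str.lower) (fun y => y) = _
          exact PySem.List.min?_id_cons _ _
        set m := (t.map PySem.Str.lower).foldl min (PySem.Str.lower x) with hm
        have hmmem : m ∈ ys := PySem.List.min?_mem hmin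
        have hmmin : ∀ y ∈ ys, m ≤ y := PySem.List.min?_isMin hmin
        have hmof : m ∈ PySem.Set.ofList ys := (PySem.Set.mem_ofList ys m).2 hmmem
        rcases hS : PySem.List.sorted (PySem.Set.ofList ys) (fun y => y) false with _ | ⟨h0, tt⟩
        · rw [(PySem.List.sorted_eq_nil_iff _ _ _).1 hS] at hmof
          simp at hmof
        · have hh0ys : h0 ∈ ys := (PySem.Set.mem_ofList ys h0).1
            (((PySem.List.sorted_perm (PySem.Set.ofList ys) (fun y => y) false).mem_iff).1
              (by rw [hS]; simp))
          have heq : h0 = m :=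
            le_antisymm (PySem.List.key_head_sorted_le (PySem.Set.ofList ys) (fun y => y) hS m hmof)
              (hmmin h0 hh0ys)
          have hB : pvMFold none ys = some m := by
            show pvMFold none (PySem.Str.lower x :: t.map PySem.Str.lower) = some m
            have h := pvMFold_some (t.map PySem.Str.lower) (PySem.Str.lower x)
            simp only [pvMFold, List.foldl_cons] at h ⊢
            rw [h]
          rw [hB]
          simp [heq]

-- ===== VERDICT (by name: the statement is the Claim_ definition above) =====
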